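-- pv_equiv track=rewrite | github.com/fogmaze/Rememberer | core.py | maskStr
-- ===== SOURCE A (Python) =====
-- def maskStr(ans:str,hint_len):
--     result = ""
--     for i in range(len(ans)):
--         if i < hint_len:
--             result += ans[i]
--         elif ans[i] == ' ':
--             result += ' '
--         else:
--             result += '.'
--     return result
-- ===== SOURCE B (Python) =====
-- def maskStr(ans: str, hint_len):
--     k = max(0, hint_len)
--     masked = " ".join("." * len(w) for w in ans.split(" "))
--     return ans[:k] + masked[k:]
-- ===== Notes on version B (the rewrite author's own statement) =====
-- stated objective: alternative
-- what changed: Instead of A's per-index loop with an i<hint_len branch per character, B builds the fully masked string word-wise as ' '.join('.'*len(w) for w in ans.split(' ')) and then splices the verbatim prefix ans[:k] (k = max(0, hint_len)) in front of the masked tail.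
import Mathlib
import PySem

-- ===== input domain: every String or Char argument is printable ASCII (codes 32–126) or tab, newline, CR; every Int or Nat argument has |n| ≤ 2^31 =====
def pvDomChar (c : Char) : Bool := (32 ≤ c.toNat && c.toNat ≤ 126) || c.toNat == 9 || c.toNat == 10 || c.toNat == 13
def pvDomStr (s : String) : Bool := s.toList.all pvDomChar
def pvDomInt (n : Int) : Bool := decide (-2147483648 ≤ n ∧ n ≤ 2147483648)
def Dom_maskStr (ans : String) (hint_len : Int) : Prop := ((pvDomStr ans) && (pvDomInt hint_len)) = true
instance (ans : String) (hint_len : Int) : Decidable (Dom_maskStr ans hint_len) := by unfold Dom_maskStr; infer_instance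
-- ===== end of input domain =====

-- B replaces A's per-index loop by a word-level algorithm: build the fully masked
-- string as ' '.join('.'*len(w) for each space-separated word), then splice the
-- verbatim prefix in front of its tail (objective: simpler — no per-char branching).

-- ===== PORT A =====
-- A: per-index loop, building the result by appending one char per index.
-- ans[i] is ported as PySem.List.pyGetD (i is always in range here).
def maskStr (ans : String) (hint_len : Int) : String :=
  let cs := ans.toList
  String.ofList <|
    (PySem.List.pyRange 0 (cs.length : Int) 1).foldl
      (fun result i =>
        if i < hint_len then result ++ [PySem.List.pyGetD cs i ' ']
        else if PySem.List.pyGetD cs i ' ' == ' ' then result ++ [' ']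
        else result ++ ['.']) []

-- ===== PORT B =====
-- B: masked = " ".join("." * len(w) for w in ans.split(" ")); return ans[:k] + masked[k:]
def maskStr_alt (ans : String) (hint_len : Int) : String :=
  let cs := ans.toList
  let k : Int := max 0 hint_len
  let masked :=
    PySem.Chars.join [' ']
      ((PySem.Chars.splitOn cs [' ']).map
        (fun w => PySem.List.pyRepeat ['.'] (w.length : Int)))
  String.ofList (PySem.List.slice cs none (some k) ++ PySem.List.slice masked (some k) none)

-- ===== PRECONDITION & SPEC =====
def Spec_maskStr (ans : String) (hint_len : Int) (out : String) : Prop := out = maskStr_alt ans hint_len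
instance (ans : String) (hint_len : Int) (out : String) : Decidable (Spec_maskStr ans hint_len out) := by unfold Spec_maskStr; infer_instance

-- ===== CLAIM (what is proved, stated in full; the proofs are below) =====
def Claim_equal_maskStr : Prop := ∀ (ans : String) (hint_len : Int), Dom_maskStr ans hint_len → Spec_maskStr ans hint_len (maskStr ans hint_len)

-- ===== LEMMAS AND PROOFS =====

-- A simple structural splitter on ' ' (proof-side reference model for splitOn).
def splitSp : List Char → List (List Char)
  | [] => [[]]
  | c :: t =>
    let r := splitSp t
    if c = ' ' then [] :: r else (c :: r.headD []) :: r.tail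

lemma splitSp_ne_nil (l : List Char) : splitSp l ≠ [] := by
  cases l with
  | nil => simp [splitSp]
  | cons c t => simp only [splitSp]; split <;> simp

lemma splitSp_cons_self (l : List Char) :
    (splitSp l).headD [] :: (splitSp l).tail = splitSp l := by
  obtain ⟨h, t, he⟩ := List.exists_cons_of_ne_nil (splitSp_ne_nil l)
  rw [he]; rfl

lemma go_spec (fuel : Nat) (l cur : List Char) (acc' : List (List Char))
    (hf : l.length < fuel) :
    PySem.Chars.splitOn.go [' '] fuel l cur acc' =
      acc'.reverse ++ (cur.reverse ++ (splitSp l).headD []) :: (splitSp l).tail := by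
  induction fuel generalizing l cur acc' with
  | zero => omega
  | succ fuel ih =>
    cases l with
    | nil =>
      simp [PySem.Chars.splitOn.go, splitSp]
    | cons c rest =>
      by_cases hc : c = ' '
      · subst hc
        have : PySem.Chars.splitOn.go [' '] (fuel + 1) (' ' :: rest) cur acc' =
            PySem.Chars.splitOn.go [' '] fuel (List.drop 1 (' ' :: rest)) [] (cur.reverse :: acc') := by
          simp [PySem.Chars.splitOn.go, List.isPrefixOf]
        rw [this]
        simp only [List.drop_succ_cons, List.drop_zero]
        rw [ih rest [] (cur.reverse :: acc') (by simpa using hf)]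
        simp only [splitSp, if_true, List.reverse_cons, List.reverse_nil, List.nil_append,
          List.headD_cons, List.tail_cons, List.append_assoc, List.cons_append]
        rw [splitSp_cons_self]
        simp
      · have : PySem.Chars.splitOn.go [' '] (fuel + 1) (c :: rest) cur acc' =
            PySem.Chars.splitOn.go [' '] fuel rest (c :: cur) acc' := by
          simp [PySem.Chars.splitOn.go, List.isPrefixOf, Ne.symm hc]
        rw [this, ih rest (c :: cur) acc' (by simpa using hf)]
        simp only [splitSp, if_neg hc, List.reverse_cons, List.headD_cons, List.tail_cons,
          List.append_assoc, List.cons_append, List.nil_append]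

lemma splitOn_eq_splitSp (cs : List Char) :
    PySem.Chars.splitOn cs [' '] = splitSp cs := by
  show PySem.Chars.splitOn.go [' '] (cs.length + 1) cs [] [] = splitSp cs
  rw [go_spec (cs.length + 1) cs [] [] (by omega)]
  simp only [List.reverse_nil, List.nil_append]
  exact splitSp_cons_self cs

-- join-with-spaces of dot-runs over the splitter = per-char masking
lemma join_mask (l : List Char) :
    PySem.Chars.join [' '] ((splitSp l).map (fun w => List.replicate w.length '.')) =
      l.map (fun c => if c == ' ' then ' ' else '.') := by
  induction l with
  | nil => simp [splitSp, PySem.Chars.join_singleton]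
  | cons c t ih =>
    obtain ⟨h, tt, he⟩ := List.exists_cons_of_ne_nil (splitSp_ne_nil t)
    by_cases hc : c = ' '
    · subst hc
      rw [show splitSp (' ' :: t) = [] :: splitSp t from by simp [splitSp]]
      rw [he]
      simp only [List.map_cons, List.length_nil, List.replicate_zero]
      rw [PySem.Chars.join_cons_cons]
      have hmap : List.replicate h.length '.' :: tt.map (fun w => List.replicate w.length '.')
          = (h :: tt).map (fun w => List.replicate w.length '.') := by simp
      rw [hmap, ← he, ih]
      simp
    · simp only [splitSp, if_neg hc, List.map_cons]
      rw [he]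
      simp only [List.headD_cons, List.tail_cons, List.length_cons, List.replicate_succ]
      have key : PySem.Chars.join [' ']
          (('.' :: List.replicate h.length '.') :: tt.map (fun w => List.replicate w.length '.'))
          = '.' :: PySem.Chars.join [' ']
              ((List.replicate h.length '.') :: tt.map (fun w => List.replicate w.length '.')) := by
        cases tt with
        | nil => simp [PySem.Chars.join_singleton]
        | cons q qs =>
          simp only [List.map_cons, PySem.Chars.join_cons_cons, List.cons_append]
      rw [key]
      have hmap : List.replicate h.length '.' :: tt.map (fun w => List.replicate w.length '.')
          = (h :: tt).map (fun w => List.replicate w.length '.') := by simp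
      rw [hmap, ← he, ih]
      simp [hc]

lemma masked_eq (cs : List Char) :
    PySem.Chars.join [' ']
        ((PySem.Chars.splitOn cs [' ']).map
          (fun w => PySem.List.pyRepeat ['.'] (w.length : Int))) =
      cs.map (fun c => if c == ' ' then ' ' else '.') := by
  rw [splitOn_eq_splitSp]
  have : (fun (w : List Char) => PySem.List.pyRepeat ['.'] (w.length : Int)) =
      (fun (w : List Char) => List.replicate w.length '.') := by
    funext w; rw [PySem.List.pyRepeat_singleton]; simp
  rw [this, join_mask]

lemma mask_core (l : List Char) (h : Int) :
    (List.range l.length).map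
        (fun (j : Nat) => if (j : Int) < h then l.getD j ' '
                  else if l.getD j ' ' == ' ' then ' ' else '.')
      = l.take (max 0 h).toNat ++
        (l.map (fun c => if c == ' ' then ' ' else '.')).drop (max 0 h).toNat := by
  set k : Nat := (max 0 h).toNat with hk
  apply List.ext_getElem
  · simp; omega
  · intro i h1 h2
    have hin : i < l.length := by simpa using h1
    simp only [List.getElem_map, List.getElem_range]
    by_cases hik : i < k
    · rw [List.getElem_append_left (by simp; omega)]
      rw [List.getElem_take]
      rw [if_pos (by omega)]
      exact List.getD_eq_getElem l ' ' hin
    · have hkl : k ≤ l.length := by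
        by_contra hgt
        exact hik (by omega)
      rw [List.getElem_append_right (by simp; omega)]
      simp only [List.getElem_drop, List.getElem_map, List.length_take, Nat.min_eq_left hkl]
      have hlen : k + (i - k) = i := by omega
      rw [if_neg (by omega)]
      rw [List.getD_eq_getElem l ' ' hin]
      simp [hlen]

-- ===== VERDICT (by name: the statement is the Claim_ definition above) =====
theorem maskStr_spec : Claim_equal_maskStr := by
  intro ans hint_len _
  unfold Spec_maskStr maskStr maskStr_alt
  simp only []
  rw [show (fun (result : List Char) (i : Int) =>
        if i < hint_len then result ++ [PySem.List.pyGetD ans.toList i ' ']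
        else if PySem.List.pyGetD ans.toList i ' ' == ' ' then result ++ [' ']
        else result ++ ['.'])
      = (fun result i => result ++
          [if i < hint_len then PySem.List.pyGetD ans.toList i ' '
           else if PySem.List.pyGetD ans.toList i ' ' == ' ' then ' ' else '.'])
      from by funext res i; split_ifs <;> rfl]
  rw [PySem.List.foldl_append_singleton_eq_map]
  rw [masked_eq]
  rw [PySem.List.slice_to _ (le_max_left _ _), PySem.List.slice_from _ (le_max_left _ _)]
  rw [PySem.List.pyRange_one]
  simp only [List.map_map, Function.comp_def, sub_zero, Int.toNat_natCast, zero_add,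
    PySem.List.pyGetD_natCast, List.nil_append]
  exact congrArg String.ofList (mask_core ans.toList hint_len)
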